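-- pv_equiv track=rewrite | github.com/milith0kun/RepicacionBio | ovo/ovo/core/utils/residue_selection.py | from_hotspots_to_segments
-- ===== SOURCE A (Python) =====
-- from collections import defaultdict
--
-- def from_residues_to_segments(
--     chain_id: str, residues: list[int], start_res: int | None = None, end_res: int | None = None
-- ) -> list[str]:
--     """Convert a list of residues [3,4,5,6,9,10,...] into a list of segments [3-6,9-10,...].
--
--     Args:
--         chain_id (str): Required. The chain ID.
--         residues (list[int]): Required. A list of residues.
--         start_res (int, optional): The start residue. If specified, trims residues from start_res. Defaults to None.
--         end_res (int, optional): The end residue. If specified, trims residues to end_res. Defaults to None.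
--
--     Returns:
--         list(str): A list of segments, i.e. [3-6,9-10,...]
--     """
--
--     if not residues:
--         return []
--
--     if start_res is not None:
--         residues = [res for res in residues if res >= start_res]
--     if end_res is not None:
--         residues = [res for res in residues if res <= end_res]
--
--     segments = []
--     start = end = residues[0]
--     for i in range(1, len(residues)):
--         if residues[i] == residues[i - 1] + 1:
--             end = residues[i]
--         else:
--             segments.append(f"{chain_id}{start}-{end}")
--             start = end = residues[i]
--     segments.append(f"{chain_id}{start}-{end}")
--     return segments
--
-- def from_hotspots_to_segments(hotspots: str) -> list[str] | None:
--     hotspots_by_chain = defaultdict(list)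
--
--     if not hotspots:
--         return None
--
--     # TODO: Maybe some more regex checks?
--     for s in hotspots.split(","):
--         hotspots_by_chain[s[0]].append(int(s[1:].replace(" ", "")))
--
--     result = []
--     for chain, hotspot_nums in hotspots_by_chain.items():
--         hotspot_nums.sort()
--         result.extend(from_residues_to_segments(chain, hotspot_nums))
--
--     return result
-- ===== SOURCE B (Python) =====
-- from itertools import groupby
--
--
-- def from_hotspots_to_segments(hotspots):
--     if not hotspots:
--         return None
--
--     pairs = [(s[0], int(s[1:].replace(" ", ""))) for s in hotspots.split(",")]
--     chains = list(dict.fromkeys(c for c, _ in pairs))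
--
--     result = []
--     for chain in chains:
--         nums = sorted(n for c, n in pairs if c == chain)
--         for _, grp in groupby(enumerate(nums), key=lambda p: p[1] - p[0]):
--             vals = [v for _, v in grp]
--             result.append(f"{chain}{vals[0]}-{vals[-1]}")
--     return result
-- ===== Notes on version B (the rewrite author's own statement) =====
-- stated objective: idiomatic
-- what changed: Replaced the defaultdict grouping plus the stateful start/end index loop with a parsed (chain, num) pairs list, ordered dedup of chains, and itertools.groupby on enumerate(sorted(nums)) keyed by value-minus-index to collapse consecutive runs.
import Mathlib
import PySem

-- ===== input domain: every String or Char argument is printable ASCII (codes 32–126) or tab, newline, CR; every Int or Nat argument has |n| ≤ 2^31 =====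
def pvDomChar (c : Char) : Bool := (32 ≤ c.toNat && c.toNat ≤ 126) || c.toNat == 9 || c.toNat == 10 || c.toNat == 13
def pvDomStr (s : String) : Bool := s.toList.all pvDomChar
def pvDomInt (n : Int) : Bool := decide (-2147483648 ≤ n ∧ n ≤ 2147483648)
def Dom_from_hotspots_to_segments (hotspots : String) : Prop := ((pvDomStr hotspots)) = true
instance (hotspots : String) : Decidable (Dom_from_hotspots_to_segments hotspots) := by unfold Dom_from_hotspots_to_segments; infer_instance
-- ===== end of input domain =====

-- B replaces the defaultdict grouping and the stateful start/end run loop by a parsed pairs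
-- list, ordered dedup of chains, and grouping consecutive integers (groupby by value-minus-index);
-- objective: idiomatic; same cost.


-- ===== PORT A =====
-- the `for i in range(1, len(residues))` loop of from_residues_to_segments; iterating over the
-- tail is faithful because after each step (and initially) `end` equals residues[i-1]
def pyFRTSLoop (chain : String) : List Int → Int → Int → List String → List String
  | [], start, e, segs => segs ++ [chain ++ PySem.Int.toStr start ++ "-" ++ PySem.Int.toStr e]
  | r :: rest, start, e, segs =>
    if r = e + 1 then pyFRTSLoop chain rest start r segs
    else pyFRTSLoop chain rest r r (segs ++ [chain ++ PySem.Int.toStr start ++ "-" ++ PySem.Int.toStr e])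

def from_residues_to_segments (chain : String) (residues : List Int)
    (start_res end_res : Option Int) : List String :=
  match residues with
  | [] => []
  | _ :: _ =>
    let res1 := match start_res with
      | some s => residues.filter (fun r => decide (s ≤ r))
      | none => residues
    let res2 := match end_res with
      | some e => res1.filter (fun r => decide (r ≤ e))
      | none => res1
    match res2 with
    | [] => []  -- Python raises IndexError (residues[0]) here; unreachable at A's call site (both trims are None)
    | r0 :: rest => pyFRTSLoop chain rest r0 r0 []

-- s[0] / int(s[1:].replace(" ", "")); the .getD defaults stand for IndexError / ValueError,
-- both excluded by Pre_
def from_hotspots_to_segments (hotspots : String) : Option (List String) :=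
  if hotspots = "" then none
  else
    let d := ((PySem.Str.split? hotspots ",").getD []).foldl
      (fun d s => d.modify ((PySem.Str.pyGet? s 0).getD ' ') []
        (· ++ [(PySem.Int.ofStr? (PySem.Str.replace (PySem.Str.slice s (some 1) none) " " "")).getD 0]))
      PySem.Dict.empty
    some (d.items.foldl
      (fun result p =>
        result ++ from_residues_to_segments (String.ofList [p.1])
          (PySem.List.sorted p.2 (fun x => x) false) none none)
      [])

-- ===== PORT B =====
-- one maximal consecutive run: given the first value seen so far and the rest, return the
-- run's last value and the remaining list
def pyRun : Int → List Int → Int × List Int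
  | cur, [] => (cur, [])
  | cur, r :: rest => if r = cur + 1 then pyRun r rest else (cur, r :: rest)

theorem pyRun_len : ∀ (cur : Int) (l : List Int), (pyRun cur l).2.length ≤ l.length := by
  intro cur l
  induction l generalizing cur with
  | nil => simp [pyRun]
  | cons r rest ih =>
    simp only [pyRun]
    split
    · exact le_trans (ih r) (Nat.le_succ _)
    · simp

-- itertools.groupby(enumerate(nums), key=val-idx): groups are exactly the maximal consecutive
-- runs; each group contributes f"{chain}{vals[0]}-{vals[-1]}"
def pyChunks (chain : Char) : List Int → List String
  | [] => []
  | r :: rest =>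
    (String.ofList [chain] ++ PySem.Int.toStr r ++ "-" ++ PySem.Int.toStr (pyRun r rest).1)
      :: pyChunks chain (pyRun r rest).2
termination_by l => l.length
decreasing_by exact Nat.lt_succ_of_le (pyRun_len r rest)

def from_hotspots_to_segments_alt (hotspots : String) : Option (List String) :=
  if hotspots = "" then none
  else
    let pairs := ((PySem.Str.split? hotspots ",").getD []).map (fun s =>
      ((PySem.Str.pyGet? s 0).getD ' ',
       (PySem.Int.ofStr? (PySem.Str.replace (PySem.Str.slice s (some 1) none) " " "")).getD 0))
    let chains := PySem.List.dedup (pairs.map Prod.fst)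
    some (chains.flatMap (fun chain =>
      pyChunks chain
        (PySem.List.sorted ((pairs.filter (fun p => p.1 == chain)).map Prod.snd) (fun x => x) false)))

-- ===== PRECONDITION & SPEC =====
-- Pre_ excludes exactly the inputs where Python A raises: a comma piece that is empty
-- (IndexError on s[0]) or whose remainder after removing spaces is not int()-parsable (ValueError)
def Pre_from_hotspots_to_segments (hotspots : String) : Prop :=
  hotspots = "" ∨
    ∀ s ∈ (PySem.Str.split? hotspots ",").getD [],
      s ≠ "" ∧ (PySem.Int.ofStr? (PySem.Str.replace (PySem.Str.slice s (some 1) none) " " "")).isSome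
instance (hotspots : String) : Decidable (Pre_from_hotspots_to_segments hotspots) := by
  unfold Pre_from_hotspots_to_segments; infer_instance

def pvWitness_from_hotspots_to_segments : String := "A1,A2,B 10,A7"

def Spec_from_hotspots_to_segments (hotspots : String) (out : Option (List String)) : Prop := out = from_hotspots_to_segments_alt hotspots
instance (hotspots : String) (out : Option (List String)) : Decidable (Spec_from_hotspots_to_segments hotspots out) := by unfold Spec_from_hotspots_to_segments; infer_instance

-- ===== CLAIM (what is proved, stated in full; the proofs are below) =====
def Claim_equal_from_hotspots_to_segments : Prop := ∀ (hotspots : String), Dom_from_hotspots_to_segments hotspots → Pre_from_hotspots_to_segments hotspots → Spec_from_hotspots_to_segments hotspots (from_hotspots_to_segments hotspots)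

-- ===== LEMMAS AND PROOFS =====

-- A's run loop equals: close the current run with pyRun, then B's pyChunks on the remainder
theorem pyFRTSLoop_eq_chunks (c : Char) :
    ∀ (l : List Int) (start e : Int) (segs : List String),
      pyFRTSLoop (String.ofList [c]) l start e segs =
        segs ++ ((String.ofList [c] ++ PySem.Int.toStr start ++ "-" ++ PySem.Int.toStr (pyRun e l).1)
                  :: pyChunks c (pyRun e l).2) := by
  intro l
  induction l with
  | nil => intro start e segs; simp [pyFRTSLoop, pyRun, pyChunks]
  | cons r rest ih =>
    intro start e segs
    by_cases h : r = e + 1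
    · simp only [pyFRTSLoop, pyRun, if_pos h]
      exact ih start r segs
    · simp only [pyFRTSLoop, pyRun, if_neg h]
      rw [ih r r]
      rw [pyChunks]
      simp

theorem frts_eq_chunks (c : Char) (l : List Int) :
    from_residues_to_segments (String.ofList [c]) l none none = pyChunks c l := by
  cases l with
  | nil => simp [from_residues_to_segments, pyChunks]
  | cons r0 rest =>
    simp only [from_residues_to_segments]
    rw [pyFRTSLoop_eq_chunks c rest r0 r0 []]
    rw [pyChunks]
    simp

-- the grouping dict A builds, seen as: first-seen chain order, each chain with its values
theorem dict_items_grouped (l : List String) (key : String → Char) (val : String → Int) :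
    (List.foldl (fun d s => d.modify (key s) [] (fun x => x ++ [val s])) PySem.Dict.empty l).items
    = (PySem.List.dedup (l.map key)).map
        (fun c => (c, ((l.map (fun s => (key s, val s))).filter (fun p => p.1 == c)).map (fun p => p.2))) := by
  have hfold : List.foldl (fun d s => d.modify (key s) [] (fun x => x ++ [val s])) PySem.Dict.empty l
      = List.foldl (fun d p => d.modify p.1 [] (fun x => x ++ [p.2])) PySem.Dict.empty
          (l.map (fun s => (key s, val s))) := by
    rw [List.foldl_map]
  rw [hfold]
  have hnd : (List.foldl (fun d p => d.modify p.1 [] fun x => x ++ [p.2])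
      (PySem.Dict.empty : PySem.Dict Char (List Int)) (l.map (fun s => (key s, val s)))).keys.Nodup :=
    PySem.Dict.nodup_keys_foldl_modify_key _ Prod.fst [] (fun _ p => fun x => x ++ [p.2]) _ (by simp)
  rw [PySem.Dict.items_eq_map_keys _ hnd []]
  have hk : (List.foldl (fun d p => d.modify p.1 [] fun x => x ++ [p.2])
      (PySem.Dict.empty : PySem.Dict Char (List Int)) (l.map (fun s => (key s, val s)))).keys
      = PySem.List.dedup (l.map key) := by
    have := PySem.Dict.keys_foldl_modify_key (l.map (fun s => (key s, val s))) Prod.fst []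
      (fun _ p => fun x => x ++ [p.2]) (PySem.Dict.empty : PySem.Dict Char (List Int))
    rw [show (List.foldl (fun d p => d.modify p.1 [] fun x => x ++ [p.2])
      (PySem.Dict.empty : PySem.Dict Char (List Int)) (l.map (fun s => (key s, val s)))).keys
      = PySem.Set.update (PySem.Dict.empty : PySem.Dict Char (List Int)).keys
          ((l.map (fun s => (key s, val s))).map Prod.fst) from this]
    simp [PySem.Set.update_eq_append_filter, PySem.List.dedup_eq_ofList, List.map_map, Function.comp_def]
  rw [hk]
  apply List.map_congr_left
  intro c _
  rw [PySem.Dict.getD_foldl_modify_append]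
  simp


-- ===== VERDICT (by name: the statement is the Claim_ definition above) =====
theorem from_hotspots_to_segments_spec : Claim_equal_from_hotspots_to_segments := by
  intro hotspots _ _
  unfold Spec_from_hotspots_to_segments
  unfold from_hotspots_to_segments from_hotspots_to_segments_alt
  by_cases h0 : hotspots = ""
  · simp [h0]
  · simp only [if_neg h0]
    rw [PySem.List.foldl_append_eq_flatMap]
    rw [dict_items_grouped ((PySem.Str.split? hotspots ",").getD [])
        (fun s => (PySem.Str.pyGet? s 0).getD ' ')
        (fun s => (PySem.Int.ofStr? (PySem.Str.replace (PySem.Str.slice s (some 1) none) " " "")).getD 0)]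
    simp only [List.flatMap_map, List.map_map]
    simp only [frts_eq_chunks]
    simp [Function.comp_def]
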